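-- pv_equiv track=rewrite | github.com/adieyal/computational-geometry | segment-trees/code/chapter 1/sqrt_decomposition.py | build_sqrt_decomposition
-- ===== SOURCE A (Python) =====
-- import math
--
-- def build_sqrt_decomposition(arr):
--     n = len(arr)
--     block_size = int(math.sqrt(n))
--     num_blocks = (n + block_size - 1) // block_size
--     block = [0] * num_blocks
--     for i in range(n):
--         block[i // block_size] += arr[i]
--     # Return all necessary data as a tuple
--     return arr, block, block_size
-- ===== SOURCE B (Python) =====
-- import math
--
-- def build_sqrt_decomposition(arr):
--     n = len(arr)
--     block_size = int(math.sqrt(n))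
--     block = []
--     rest = arr
--     while rest:
--         block.append(sum(rest[:block_size]))
--         rest = rest[block_size:]
--     return arr, block, block_size
-- ===== Notes on version B (the rewrite author's own statement) =====
-- stated objective: alternative
-- what changed: replaces the preallocated block array updated by a per-element scatter loop (block[i//block_size] += arr[i]) with a while loop that consumes the list in contiguous block_size chunks, appending each chunk's sum; the num_blocks ceiling division disappears
import Mathlib
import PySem

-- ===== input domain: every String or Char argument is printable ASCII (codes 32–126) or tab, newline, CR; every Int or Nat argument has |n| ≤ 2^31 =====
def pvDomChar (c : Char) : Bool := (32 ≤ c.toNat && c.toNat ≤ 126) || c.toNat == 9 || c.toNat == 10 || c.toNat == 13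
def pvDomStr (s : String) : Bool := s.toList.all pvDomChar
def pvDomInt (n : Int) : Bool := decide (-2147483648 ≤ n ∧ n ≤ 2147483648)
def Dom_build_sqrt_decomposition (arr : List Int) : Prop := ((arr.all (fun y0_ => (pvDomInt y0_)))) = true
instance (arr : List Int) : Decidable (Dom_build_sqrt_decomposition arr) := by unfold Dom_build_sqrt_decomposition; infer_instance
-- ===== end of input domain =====

-- B replaces A's preallocated block array and per-element scatter loop with a while loop that
-- consumes the list in contiguous chunks of block_size, appending each chunk's sum (objective:
-- alternative); return value only, no mutation.

-- ===== PORT A =====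
-- int(math.sqrt(n)) for a list length n is exactly Nat.sqrt n (lengths are far below 2^52,
-- where float sqrt followed by truncation agrees with the integer square root).
def build_sqrt_decomposition (arr : List Int) : List Int × List Int × Int :=
  let n : Int := (arr.length : Int)
  let block_size : Int := (Nat.sqrt arr.length : Int)
  let num_blocks : Int := PySem.Int.floordiv (n + block_size - 1) block_size
  let block : List Int :=
    (PySem.List.pyRange 0 n 1).foldl
      (fun b i =>
        b.set (PySem.Int.floordiv i block_size).toNat
          (PySem.List.pyGetD b (PySem.Int.floordiv i block_size) 0 + PySem.List.pyGetD arr i 0))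
      (List.replicate num_blocks.toNat 0)
  (arr, block, block_size)

-- ===== PORT B =====
-- Source B's while loop 'while rest: block.append(sum(rest[:bs])); rest = rest[bs:]' as a recursion
-- on rest.  For bs ≥ 1 (every state the Python loop reaches: the loop only runs on a nonempty
-- arr, where bs = int(sqrt(n)) ≥ 1) '(x::xs)[:bs] = x :: xs[:bs-1]' and '(x::xs)[bs:] = xs[bs-1:]',
-- which is how the step is written so that the recursion is structurally decreasing.
def chunkSums (bs : Nat) : List Int → List Int
  | [] => []
  | x :: xs => (x :: xs.take (bs - 1)).sum :: chunkSums bs (xs.drop (bs - 1))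
  termination_by l => l.length
  decreasing_by
    simp only [List.length_cons, List.length_drop]
    omega

def build_sqrt_decomposition_alt (arr : List Int) : List Int × List Int × Int :=
  let block_size : Int := (Nat.sqrt arr.length : Int)
  let block : List Int := chunkSums block_size.toNat arr
  (arr, block, block_size)

-- ===== PRECONDITION & SPEC =====
-- Pre_ excludes only the empty list, on which A raises ZeroDivisionError
-- (block_size = int(sqrt(0)) = 0 and num_blocks divides by it).
def Pre_build_sqrt_decomposition (arr : List Int) : Prop := arr ≠ []
instance (arr : List Int) : Decidable (Pre_build_sqrt_decomposition arr) := by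
  unfold Pre_build_sqrt_decomposition; infer_instance

def pvWitness_build_sqrt_decomposition : List Int := [1, 2, 3]

def Spec_build_sqrt_decomposition (arr : List Int) (out : List Int × List Int × Int) : Prop :=
  out = build_sqrt_decomposition_alt arr
instance (arr : List Int) (out : List Int × List Int × Int) :
    Decidable (Spec_build_sqrt_decomposition arr out) := by
  unfold Spec_build_sqrt_decomposition; infer_instance

-- ===== CLAIM (what is proved, stated in full; the proofs are below) =====
def Claim_equal_build_sqrt_decomposition : Prop :=
  ∀ (arr : List Int), Dom_build_sqrt_decomposition arr →
    Pre_build_sqrt_decomposition arr →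
    Spec_build_sqrt_decomposition arr (build_sqrt_decomposition arr)

-- ===== LEMMAS AND PROOFS =====

-- A's loop body, on the Nat side.
def pvStepA (s : Nat) (arr : List Int) (b : List Int) (k : Nat) : List Int :=
  b.set (k / s) (b.getD (k / s) 0 + arr.getD k 0)

lemma pvMapGetDRange (l : List Int) (m : Nat) (h : m ≤ l.length) :
    (List.range m).map (fun k => l.getD k 0) = l.take m := by
  apply List.ext_getElem
  · simp [h]
  · intro i h1 h2
    simp only [List.getElem_map, List.getElem_range, List.getElem_take]
    exact List.getD_eq_getElem l 0 (by simp at h1; omega)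

lemma pvFoldSmall (s : Nat) (arr : List Int) (xs : List Nat)
    (hxs : ∀ k ∈ xs, k < s) (x : Int) (t : List Int) :
    xs.foldl (pvStepA s arr) (x :: t)
      = (x + (xs.map (fun k => arr.getD k 0)).sum) :: t := by
  induction xs generalizing x with
  | nil => simp
  | cons k ks ih =>
    have hk : k < s := hxs k (by simp)
    simp only [List.foldl_cons, pvStepA, Nat.div_eq_of_lt hk, List.getD_cons_zero,
      List.set_cons_zero]
    rw [ih (fun a ha => hxs a (by simp [ha])) (x + arr.getD k 0)]
    simp [add_assoc]

lemma pvFoldShift (s : Nat) (hs : 0 < s) (arr : List Int) (xs : List Nat)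
    (x : Int) (t : List Int) :
    (xs.map (fun k => s + k)).foldl (pvStepA s arr) (x :: t)
      = x :: xs.foldl (pvStepA s (arr.drop s)) t := by
  induction xs generalizing t with
  | nil => simp
  | cons k ks ih =>
    simp only [List.map_cons, List.foldl_cons]
    have hstep : pvStepA s arr (x :: t) (s + k) = x :: pvStepA s (arr.drop s) t k := by
      simp only [pvStepA, Nat.add_div_left k hs]
      have hget : arr.getD (s + k) 0 = (arr.drop s).getD k 0 := by
        simp [List.getD]
      rw [hget]
      simp
    rw [hstep, ih]

lemma pvChunkFold (s : Nat) (hs : 0 < s) :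
    ∀ (K : Nat) (arr : List Int), arr.length ≤ K * s →
      (List.range arr.length).foldl (pvStepA s arr) (List.replicate K 0)
        = (List.range K).map (fun j => ((arr.drop (j * s)).take s).sum) := by
  intro K
  induction K with
  | zero =>
    intro arr h
    have : arr.length = 0 := by omega
    simp [this]
  | succ K ih =>
    intro arr h
    have hrep : List.replicate (K + 1) (0 : Int) = 0 :: List.replicate K 0 := rfl
    rw [hrep]
    by_cases hns : arr.length ≤ s
    · -- a single (possibly short) block: every index goes to slot 0
      rw [pvFoldSmall s arr _ (fun k hk => by simp at hk; omega) 0 _]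
      rw [pvMapGetDRange arr arr.length le_rfl, List.take_length, zero_add]
      rw [List.range_succ_eq_map]
      simp only [List.map_cons, List.map_map]
      congr 1
      · simp [List.take_of_length_le hns]
      · have : ∀ j ∈ List.range K,
            ((fun j => ((arr.drop (j * s)).take s).sum) ∘ Nat.succ) j = (0 : Int) := by
          intro j _
          have : arr.drop (Nat.succ j * s) = [] :=
            List.drop_eq_nil_of_le (by have := Nat.le_mul_of_pos_left s (Nat.succ_pos j); omega)
          simp [this]
        rw [List.map_congr_left this]
        simp [List.map_const']
    · -- peel the first full block of s elements, recurse on the rest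
      have hns' : s < arr.length := Nat.lt_of_not_le hns
      have hlen : arr.length = s + (arr.length - s) := by omega
      rw [hlen, List.range_add, List.foldl_append]
      rw [pvFoldSmall s arr _ (fun k hk => by simp at hk; omega) 0 _]
      rw [pvMapGetDRange arr s (by omega), zero_add]
      rw [pvFoldShift s hs arr _ _ _]
      have hdlen : (arr.drop s).length = arr.length - s := by simp
      have hmul : (K + 1) * s = K * s + s := by rw [Nat.succ_mul]
      rw [← hdlen, ih (arr.drop s) (by simp only [List.length_drop]; omega)]
      rw [List.range_succ_eq_map]
      simp only [List.map_cons, List.map_map]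
      congr 1
      · simp
      · apply List.map_congr_left
        intro j _
        simp only [Function.comp_apply]
        rw [List.drop_drop]
        have hidx : s + j * s = j.succ * s := by rw [Nat.succ_mul, Nat.add_comm]
        rw [hidx]

lemma pvCeilMulGe (n s : Nat) (hs : 0 < s) : n ≤ ((n + s - 1) / s) * s := by
  have h1 := Nat.div_add_mod (n + s - 1) s
  have h2 := Nat.mod_lt (n + s - 1) hs
  have h3 : ((n + s - 1) / s) * s = s * ((n + s - 1) / s) := Nat.mul_comm _ _
  omega

-- B's chunked recursion produces exactly the per-block slice sums, one per ceil(n/s) block.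
lemma pvChunkSumsNil (bs : Nat) : chunkSums bs [] = [] := by
  rw [chunkSums]

lemma pvChunkSumsEq (s : Nat) (hs : 0 < s) (arr : List Int) :
    chunkSums s arr
      = (List.range ((arr.length + s - 1) / s)).map
          (fun j => ((arr.drop (j * s)).take s).sum) := by
  obtain ⟨m, rfl⟩ := Nat.exists_eq_succ_of_ne_zero hs.ne'
  generalize hN : arr.length = N
  induction N using Nat.strong_induction_on generalizing arr with
  | _ N ih =>
    subst hN
    cases arr with
    | nil =>
      simp [pvChunkSumsNil]
    | cons x xs =>
      have hlen : (x :: xs).length = xs.length + 1 := rfl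
      rw [chunkSums]
      simp only [Nat.succ_sub_one]
      have hdrop : xs.drop m = (x :: xs).drop (m + 1) := rfl
      have htake : x :: xs.take m = (x :: xs).take (m + 1) := rfl
      by_cases hsmall : xs.length + 1 ≤ m + 1
      · -- only one (possibly short) block
        have hK : ((x :: xs).length + (m + 1) - 1) / (m + 1) = 1 := by
          rw [hlen]; exact Nat.div_eq_of_lt_le (by omega) (by omega)
        have hnil : xs.drop m = [] := List.drop_eq_nil_of_le (by omega)
        rw [hnil, hK, htake, pvChunkSumsNil]
        simp
      · -- a full first block, then recurse on the rest
        have hK : ((x :: xs).length + (m + 1) - 1) / (m + 1)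
            = ((xs.drop m).length + (m + 1) - 1) / (m + 1) + 1 := by
          have h1 : (xs.drop m).length = xs.length - m := by simp
          have h2 : (x :: xs).length + (m + 1) - 1
              = ((xs.drop m).length + (m + 1) - 1) + (m + 1) := by
            rw [hlen, h1]; omega
          rw [h2, Nat.add_div_right _ (by omega)]
        rw [hK, List.range_succ_eq_map]
        simp only [List.map_cons, List.map_map]
        congr 1
        · rw [htake]; simp
        · rw [ih (xs.drop m).length (by simp only [List.length_drop, hlen]; omega) (xs.drop m) rfl]
          apply List.map_congr_left
          intro j _
          simp only [Function.comp_apply]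
          rw [hdrop, List.drop_drop]
          congr 2
          simp only [Nat.succ_eq_add_one]
          ring_nf

-- ===== VERDICT (by name: the statement is the Claim_ definition above) =====
theorem build_sqrt_decomposition_spec : Claim_equal_build_sqrt_decomposition := by
  intro arr _ hpre
  unfold Spec_build_sqrt_decomposition build_sqrt_decomposition build_sqrt_decomposition_alt
  simp only []
  have hn : 0 < arr.length := List.length_pos_iff.mpr hpre
  set n : Nat := arr.length with hn_def
  set s : Nat := Nat.sqrt n with hs_def
  have hs : 0 < s := Nat.sqrt_pos.mpr hn
  -- num_blocks as a Nat
  have hcast : (n : Int) + (s : Int) - 1 = ((n + s - 1 : Nat) : Int) := by omega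
  have hnb : PySem.Int.floordiv ((n : Int) + (s : Int) - 1) (s : Int)
      = (((n + s - 1) / s : Nat) : Int) := by
    rw [hcast]; exact PySem.Int.floordiv_natCast _ _
  set K : Nat := (n + s - 1) / s with hK_def
  have hKn : n ≤ K * s := pvCeilMulGe n s hs
  congr 1
  rw [hnb]
  -- reduce A's Int-indexed fold to the Nat fold pvStepA
  have hA :
      (PySem.List.pyRange 0 (n : Int) 1).foldl
        (fun b i =>
          b.set (PySem.Int.floordiv i (s : Int)).toNat
            (PySem.List.pyGetD b (PySem.Int.floordiv i (s : Int)) 0 + PySem.List.pyGetD arr i 0))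
        (List.replicate ((K : Int)).toNat 0)
      = (List.range n).foldl (pvStepA s arr) (List.replicate K 0) := by
    rw [PySem.List.pyRange_one, List.foldl_map]
    simp only [Int.toNat_natCast, sub_zero, zero_add]
    congr 1
    funext b k
    simp only [pvStepA, PySem.Int.floordiv_natCast, PySem.List.pyGetD_natCast, Int.toNat_natCast]
  rw [hA, pvChunkFold s hs K arr hKn]
  simp only [Prod.mk.injEq, and_true]
  rw [Int.toNat_natCast, pvChunkSumsEq s hs arr]
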